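-- pv_equiv track=rewrite | github.com/jengori/advent_of_code_2023 | day_14/part2.py | tilt_n
-- ===== SOURCE A (Python) =====
-- def tilt_n(p):
--     while True:
--         moves = 0
--         for i in range(1, len(p)):
--             for j in range(len(p[i])):
--                 if p[i][j] == 'O' and p[i - 1][j] == '.':
--                     moves += 1
--                     p[i][j] = '.'
--                     p[i - 1][j] = 'O'
--         if moves == 0:
--             return p
-- ===== SOURCE B (Python) =====
-- def pack(seg):
--     k = seg.count('O')
--     return ['O'] * k + ['.'] * (len(seg) - k)
--
--
-- def settle(col):
--     # pack the 'O's of each maximal '.'/'O' run to its top; anything else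
--     # (including None = column absent in that row) is a fixed barrier
--     out, seg = [], []
--     for x in col:
--         if x == '.' or x == 'O':
--             seg.append(x)
--         else:
--             out.extend(pack(seg))
--             out.append(x)
--             seg = []
--     out.extend(pack(seg))
--     return out
--
--
-- def tilt_n(p):
--     width = max((len(row) for row in p), default=0)
--     new_cols = [settle([row[j] if j < len(row) else None for row in p])
--                 for j in range(width)]
--     for i, row in enumerate(p):
--         for j in range(len(row)):
--             row[j] = new_cols[j][i]
--     return p
-- ===== Notes on version B (the rewrite author's own statement) =====
-- stated objective: alternative
-- what changed: Replaces the repeated full-grid sweeps (move each 'O' up one row per pass until a pass makes no move) by a single settling pass per column that packs each run of 'O's directly below its barrier in one go.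
import Mathlib
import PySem

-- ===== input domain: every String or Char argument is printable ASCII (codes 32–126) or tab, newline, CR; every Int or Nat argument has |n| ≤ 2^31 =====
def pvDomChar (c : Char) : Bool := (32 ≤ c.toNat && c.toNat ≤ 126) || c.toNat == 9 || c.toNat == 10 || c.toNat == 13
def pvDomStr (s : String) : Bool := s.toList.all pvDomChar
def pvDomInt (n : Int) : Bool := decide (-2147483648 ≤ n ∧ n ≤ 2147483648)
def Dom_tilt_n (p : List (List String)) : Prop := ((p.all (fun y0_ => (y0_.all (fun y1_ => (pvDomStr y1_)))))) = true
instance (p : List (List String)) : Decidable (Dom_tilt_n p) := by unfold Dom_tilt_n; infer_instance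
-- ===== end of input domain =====

-- B replaces A's repeated whole-grid sweeps by a single settling pass per column (a different
-- algorithm); both Pythons mutate p in place and return it — the theorems are about the return value.

-- ===== PORT A =====
-- A's inner j-loop over one adjacent row pair: for each j, if p[i][j]=='O' and p[i-1][j]=='.'
-- swap them and count a move.  (Where Python would read p[i-1][j] out of range it raises
-- IndexError; those inputs are excluded by Pre_tilt_n below, the port makes no move there.)
def step2 : List String → List String → List String × List String × Nat
  | [], cur => ([], cur, 0)
  | a :: prev, [] => (a :: prev, [], 0)
  | a :: prev, b :: cur =>
    let r := step2 prev cur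
    if b = "O" ∧ a = "." then ("O" :: r.1, "." :: r.2.1, r.2.2 + 1)
    else (a :: r.1, b :: r.2.1, r.2.2)

-- A's i-loop (i = 1 .. len p - 1), threading the mutated previous row; returns grid and moves
def sweepRows : List String → List (List String) → List (List String) × Nat
  | prev, [] => ([prev], 0)
  | prev, cur :: rest =>
    let s := step2 prev cur
    let r := sweepRows s.2.1 rest
    (s.1 :: r.1, s.2.2 + r.2)

-- one full pass of A's while-body
def sweep : List (List String) → List (List String) × Nat
  | [] => ([], 0)
  | r :: rs => sweepRows r rs

-- fuel bound for the while-loop: each counted move drops one 'O' one row, so the weighted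
-- 'O'-count strictly decreases on every productive pass
def potFrom : Nat → List (List String) → Nat
  | _, [] => 0
  | w, r :: rs => w * r.count "O" + potFrom (w + 1) rs

-- A's `while True: … if moves == 0: return p` (fuel only makes it total; never exhausted)
def tiltLoop : Nat → List (List String) → List (List String)
  | 0, p => p
  | f + 1, p => let s := sweep p; if s.2 = 0 then p else tiltLoop f s.1

def tilt_n (p : List (List String)) : List (List String) := tiltLoop (potFrom 0 p + 1) p

-- ===== PORT B =====
def packB (seg : List (Option String)) : List (Option String) :=
  List.replicate (seg.count (some "O")) (some "O") ++
    List.replicate (seg.length - seg.count (some "O")) (some ".")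

-- Source B's settle loop: seg accumulates the current '.'/'O' run, barriers flush it
def segGo : List (Option String) → List (Option String) → List (Option String)
  | seg, [] => packB seg
  | seg, x :: r =>
    if x = some "." ∨ x = some "O" then segGo (seg ++ [x]) r
    else packB seg ++ x :: segGo [] r

def settleB (c : List (Option String)) : List (Option String) := segGo [] c

-- [row[j] if j < len(row) else None for row in p]
def colOf (p : List (List String)) (j : Nat) : List (Option String) :=
  p.map (fun row => row[j]?)

def tilt_n_alt (p : List (List String)) : List (List String) :=
  let width := (p.map List.length).foldr max 0
  let newCols := (List.range width).map (fun j => settleB (colOf p j))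
  -- write-back loop: row[j] = new_cols[j][i]  (the `none` default is never read: position
  -- (i,j) with j < len row is a `some` cell of its settled column)
  p.zipIdx.map (fun ri =>
    (List.range ri.1.length).map (fun j => (((newCols.getD j []).getD ri.2 none).getD "")))

-- ===== PRECONDITION & SPEC =====
-- Pre_ excludes exactly the inputs on which A raises IndexError (B would return the settled grid
-- there): jagged grids with an 'O' cell (i,j), or an 'O' below (i,j) with only '.' cells between,
-- in a row position j that row i-1 does not have — that 'O' settles at (i,j) and A then reads
-- p[i-1][j] out of range.
def Pre_tilt_n (p : List (List String)) : Prop :=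
  ∀ i < p.length, ∀ j < (p.getD i []).length,
    1 ≤ i → (p.getD (i - 1) []).length ≤ j →
      ∀ k < p.length, i ≤ k → (p.getD k [])[j]? = some "O" →
        ∃ m < k, i ≤ m ∧ (p.getD m [])[j]? ≠ some "."
instance (p : List (List String)) : Decidable (Pre_tilt_n p) := by
  unfold Pre_tilt_n
  have I2 : ∀ (i j : Nat), Decidable (1 ≤ i → (p.getD (i - 1) []).length ≤ j →
      ∀ k < p.length, i ≤ k → (p.getD k [])[j]? = some "O" →
        ∃ m < k, i ≤ m ∧ (p.getD m [])[j]? ≠ some ".") := fun i j => by infer_instance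
  exact @Nat.decidableBallLT _ _ (fun i hi => @Nat.decidableBallLT _ _ (fun j hj => I2 i j))

def pvWitness_tilt_n : List (List String) := [["O", ".", "#"], [".", "O", "."], ["O", "O", "."]]

def Spec_tilt_n (p : List (List String)) (out : List (List String)) : Prop := out = tilt_n_alt p
instance (p : List (List String)) (out : List (List String)) : Decidable (Spec_tilt_n p out) := by unfold Spec_tilt_n; infer_instance

-- ===== CLAIM (what is proved, stated in full; the proofs are below) =====
def Claim_equal_tilt_n : Prop := ∀ (p : List (List String)), Dom_tilt_n p → Pre_tilt_n p → Spec_tilt_n p (tilt_n p)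

-- ===== LEMMAS AND PROOFS =====

-- the column-level image of one sweep pass (proof device; not a port)
def swGo : Option String → List (Option String) → List (Option String)
  | prev, [] => [prev]
  | prev, x :: r =>
    if x = some "O" ∧ prev = some "." then some "O" :: swGo (some ".") r
    else prev :: swGo x r

def sweepColP : List (Option String) → List (Option String)
  | [] => []
  | x :: r => swGo x r

-- ---- step2 facts ----
theorem step2_fst_get (a b : List String) (j : Nat) :
    ((step2 a b).1)[j]? =
      if b[j]? = some "O" ∧ a[j]? = some "." then some "O" else a[j]? := by
  induction a generalizing b j with
  | nil => simp [step2]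
  | cons a as ih =>
    cases b with
    | nil => simp [step2]
    | cons b bs =>
      cases j with
      | zero =>
        simp only [step2]
        split_ifs with h <;> simp_all
      | succ j =>
        have h2 := ih bs j
        simp only [step2]
        split_ifs with h hc <;> simp_all

theorem step2_snd_get (a b : List String) (j : Nat) :
    ((step2 a b).2.1)[j]? =
      if b[j]? = some "O" ∧ a[j]? = some "." then some "." else b[j]? := by
  induction a generalizing b j with
  | nil => simp [step2]
  | cons a as ih =>
    cases b with
    | nil => simp [step2]
    | cons b bs =>
      cases j with
      | zero =>
        simp only [step2]
        split_ifs with h <;> simp_all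
      | succ j =>
        have h2 := ih bs j
        simp only [step2]
        split_ifs with h hc <;> simp_all

theorem step2_fst_len (a b : List String) : (step2 a b).1.length = a.length := by
  induction a generalizing b with
  | nil => simp [step2]
  | cons a as ih =>
    cases b with
    | nil => simp [step2]
    | cons b bs =>
      simp only [step2]
      split_ifs with h <;> simp [ih bs]

theorem step2_snd_len (a b : List String) : (step2 a b).2.1.length = b.length := by
  induction a generalizing b with
  | nil => simp [step2]
  | cons a as ih =>
    cases b with
    | nil => simp [step2]
    | cons b bs =>
      simp only [step2]
      split_ifs with h <;> simp [ih bs]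

theorem step2_count (a b : List String) :
    (step2 a b).1.count "O" = a.count "O" + (step2 a b).2.2 ∧
    (step2 a b).2.1.count "O" + (step2 a b).2.2 = b.count "O" := by
  induction a generalizing b with
  | nil => simp [step2]
  | cons a as ih =>
    cases b with
    | nil => simp [step2]
    | cons b bs =>
      have ih1 := (ih bs).1
      have ih2 := (ih bs).2
      simp only [step2]
      split_ifs with h
      · rcases h with ⟨hb, ha⟩
        subst hb; subst ha
        constructor
        · simp [List.count_cons]; omega
        · simp [List.count_cons]; omega
      · constructor
        · simp only [List.count_cons]
          split_ifs <;> omega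
        · simp only [List.count_cons]
          split_ifs <;> omega

theorem step2_zero (a b : List String) (h : (step2 a b).2.2 = 0) :
    (step2 a b).1 = a ∧ (step2 a b).2.1 = b := by
  induction a generalizing b with
  | nil => simp [step2]
  | cons a as ih =>
    cases b with
    | nil => simp [step2]
    | cons b bs =>
      simp only [step2] at h ⊢
      split_ifs at h ⊢ with hc
      obtain ⟨h1, h2⟩ := ih bs h
      simp [h1, h2]

-- ---- sweepRows facts ----
theorem sweepRows_col (rest : List (List String)) (prev : List String) (j : Nat) :
    ((sweepRows prev rest).1).map (fun row => row[j]?) =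
      swGo (prev[j]?) (rest.map (fun row => row[j]?)) := by
  induction rest generalizing prev with
  | nil => simp [sweepRows, swGo]
  | cons cur rest ih =>
    simp only [sweepRows, List.map_cons]
    rw [ih, step2_fst_get, step2_snd_get]
    by_cases hc : cur[j]? = some "O" ∧ prev[j]? = some "."
    · simp [swGo, hc]
    · simp [swGo, hc]

theorem sweepRows_pot (rest : List (List String)) (prev : List String) (w : Nat) :
    potFrom w ((sweepRows prev rest).1) + (sweepRows prev rest).2 = potFrom w (prev :: rest) := by
  induction rest generalizing prev w with
  | nil => simp [sweepRows, potFrom]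
  | cons cur rest ih =>
    have h1 := (step2_count prev cur).1
    have h2 := (step2_count prev cur).2
    simp only [sweepRows, potFrom]
    have ih' := ih (step2 prev cur).2.1 (w + 1)
    simp only [potFrom] at ih'
    rw [h1, ← h2]
    nlinarith [ih']

theorem sweepRows_len (rest : List (List String)) (prev : List String) :
    ((sweepRows prev rest).1).map List.length = (prev :: rest).map List.length := by
  induction rest generalizing prev with
  | nil => simp [sweepRows]
  | cons cur rest ih =>
    simp only [sweepRows, List.map_cons]
    rw [step2_fst_len]
    have := ih (step2 prev cur).2.1
    rw [this]
    simp [step2_snd_len]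

theorem sweepRows_zero (rest : List (List String)) (prev : List String)
    (h : (sweepRows prev rest).2 = 0) : (sweepRows prev rest).1 = prev :: rest := by
  induction rest generalizing prev with
  | nil => simp [sweepRows]
  | cons cur rest ih =>
    simp only [sweepRows] at h ⊢
    have hs : (step2 prev cur).2.2 = 0 := by omega
    have hr : (sweepRows (step2 prev cur).2.1 rest).2 = 0 := by omega
    obtain ⟨e1, e2⟩ := step2_zero prev cur hs
    have := ih (step2 prev cur).2.1 hr
    rw [e1, this, e2]

-- ---- sweep facts ----
theorem sweep_col (p : List (List String)) (j : Nat) :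
    colOf (sweep p).1 j = sweepColP (colOf p j) := by
  cases p with
  | nil => simp [sweep, colOf, sweepColP]
  | cons r rs => simpa [sweep, colOf, sweepColP] using sweepRows_col rs r j

theorem sweep_pot (p : List (List String)) :
    potFrom 0 (sweep p).1 + (sweep p).2 = potFrom 0 p := by
  cases p with
  | nil => simp [sweep]
  | cons r rs => exact sweepRows_pot rs r 0

theorem sweep_len (p : List (List String)) :
    ((sweep p).1).map List.length = p.map List.length := by
  cases p with
  | nil => simp [sweep]
  | cons r rs => exact sweepRows_len rs r

theorem sweep_zero (p : List (List String)) (h : (sweep p).2 = 0) : (sweep p).1 = p := by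
  cases p with
  | nil => simp [sweep]
  | cons r rs => exact sweepRows_zero rs r h

-- ---- 1D theory: settleB absorbs one sweep pass ----
theorem packB_congr (s t : List (Option String)) (hl : s.length = t.length)
    (hc : s.count (some "O") = t.count (some "O")) : packB s = packB t := by
  unfold packB
  rw [hl, hc]

theorem segGo_congr (r : List (Option String)) (s t : List (Option String))
    (hl : s.length = t.length) (hc : s.count (some "O") = t.count (some "O")) :
    segGo s r = segGo t r := by
  induction r generalizing s t with
  | nil => simpa [segGo] using packB_congr s t hl hc
  | cons x r ih =>
    simp only [segGo]
    split_ifs with h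
    · exact ih (s ++ [x]) (t ++ [x]) (by simp [hl]) (by simp [List.count_append, hc])
    · rw [packB_congr s t hl hc]

theorem segGo_swGo (r : List (Option String)) (prev : Option String) (seg : List (Option String)) :
    segGo seg (swGo prev r) = segGo seg (prev :: r) := by
  induction r generalizing prev seg with
  | nil => simp [swGo]
  | cons x r ih =>
    simp only [swGo]
    by_cases hm : x = some "O" ∧ prev = some "."
    · rw [if_pos hm]
      rcases hm with ⟨hx, hp⟩
      subst hx; subst hp
      have l1 : segGo seg (some "O" :: swGo (some ".") r)
          = segGo (seg ++ [some "O"]) (swGo (some ".") r) := by simp [segGo]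
      rw [l1, ih]
      have l2 : segGo (seg ++ [some "O"]) (some "." :: r)
          = segGo (seg ++ [some "O"] ++ [some "."]) r := by simp [segGo]
      have l3 : segGo seg (some "." :: some "O" :: r)
          = segGo (seg ++ [some "."] ++ [some "O"]) r := by simp [segGo]
      rw [l2, l3]
      apply segGo_congr
      · simp
      · simp [List.count_append]
    · rw [if_neg hm]
      by_cases hp : prev = some "." ∨ prev = some "O"
      · have l1 : segGo seg (prev :: swGo x r) = segGo (seg ++ [prev]) (swGo x r) := by
          simp [segGo, hp]
        have l2 : segGo seg (prev :: x :: r) = segGo (seg ++ [prev]) (x :: r) := by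
          simp [segGo, hp]
        rw [l1, l2, ih]
      · have l1 : segGo seg (prev :: swGo x r) = packB seg ++ prev :: segGo [] (swGo x r) := by
          simp [segGo, hp]
        have l2 : segGo seg (prev :: x :: r) = packB seg ++ prev :: segGo [] (x :: r) := by
          simp [segGo, hp]
        rw [l1, l2, ih]

theorem settle_sweepColP (c : List (Option String)) : settleB (sweepColP c) = settleB c := by
  cases c with
  | nil => rfl
  | cons x r => exact segGo_swGo r x []

-- no cell equal to some "O" directly below a cell equal to some "."
def noDotO : Option String → List (Option String) → Prop
  | _, [] => True
  | prev, x :: r => ¬(x = some "O" ∧ prev = some ".") ∧ noDotO x r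

theorem swGo_fix (r : List (Option String)) (prev : Option String)
    (h : swGo prev r = prev :: r) : noDotO prev r := by
  induction r generalizing prev with
  | nil => trivial
  | cons x r ih =>
    simp only [swGo] at h
    by_cases hm : x = some "O" ∧ prev = some "."
    · rw [if_pos hm] at h
      rcases hm with ⟨hx, hp⟩
      rw [hp] at h
      simp at h
    · rw [if_neg hm] at h
      simp only [List.cons.injEq] at h
      exact ⟨hm, ih x h.2⟩

-- fixpoints of sweepColP are settled
theorem segGo_id (r : List (Option String)) (a b : Nat)
    (hb : b ≠ 0 → r.head? ≠ some (some "O"))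
    (hnd : ∀ x rr, r = x :: rr → noDotO x rr) :
    segGo (List.replicate a (some "O") ++ List.replicate b (some ".")) r =
      (List.replicate a (some "O") ++ List.replicate b (some ".")) ++ r := by
  induction r generalizing a b with
  | nil =>
    simp only [segGo, packB]
    simp [List.count_append, List.count_replicate]
  | cons x r ih =>
    have hnd' : noDotO x r := hnd x r rfl
    have hndr : ∀ y rr, r = y :: rr → noDotO y rr := by
      intro y rr he
      rw [he] at hnd'
      exact hnd'.2
    by_cases hx : x = some "."
    · subst hx
      have l1 : segGo (List.replicate a (some "O") ++ List.replicate b (some ".")) (some "." :: r)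
          = segGo (List.replicate a (some "O") ++ List.replicate (b + 1) (some ".")) r := by
        simp [segGo, List.replicate_succ']
      rw [l1, ih a (b + 1) ?_ hndr]
      · simp [List.replicate_succ']
      · intro _ hh
        cases r with
        | nil => simp at hh
        | cons y rr =>
          simp only [List.head?_cons, Option.some.injEq] at hh
          rw [hh] at hnd'
          exact hnd'.1 ⟨rfl, rfl⟩
    · by_cases hxo : x = some "O"
      · subst hxo
        have hb0 : b = 0 := by
          by_contra hbne
          exact hb hbne (by simp)
        subst hb0
        have l1 : segGo (List.replicate a (some "O") ++ List.replicate 0 (some ".")) (some "O" :: r)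
            = segGo (List.replicate (a + 1) (some "O") ++ List.replicate 0 (some ".")) r := by
          simp [segGo, List.replicate_succ']
        rw [l1, ih (a + 1) 0 (by simp) hndr]
        simp [List.replicate_succ']
      · have l1 : segGo (List.replicate a (some "O") ++ List.replicate b (some ".")) (x :: r)
            = packB (List.replicate a (some "O") ++ List.replicate b (some "."))
                ++ x :: segGo [] r := by
          simp only [segGo]
          rw [if_neg (by tauto)]
        rw [l1]
        have l2 : segGo ([] : List (Option String)) r = r := by
          simpa using ih 0 0 (by simp) hndr
        rw [l2]
        simp only [packB]
        simp [List.count_append, List.count_replicate]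

theorem settle_fix (c : List (Option String)) (h : sweepColP c = c) : settleB c = c := by
  cases c with
  | nil => rfl
  | cons x r =>
    have hnd := swGo_fix r x h
    have := segGo_id (x :: r) 0 0 (by simp) ?_
    · simpa [settleB] using this
    · intro y rr he
      cases he
      exact hnd

-- ---- settleB shape facts ----
theorem segGo_len (r : List (Option String)) : ∀ seg,
    (segGo seg r).length = seg.length + r.length := by
  induction r with
  | nil =>
    intro seg
    have := List.count_le_length (a := some "O") (l := seg)
    simp only [segGo, packB]
    simp
    omega
  | cons x r ih =>
    intro seg
    simp only [segGo]
    split_ifs with h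
    · have := ih (seg ++ [x])
      simp at this
      simp [this]
      omega
    · have := ih []
      have hp := List.count_le_length (a := some "O") (l := seg)
      simp at this
      simp [this, packB]
      omega

theorem settle_len (c : List (Option String)) : (settleB c).length = c.length := by
  simpa using segGo_len c []

theorem packB_isSome (seg : List (Option String)) :
    (packB seg).map Option.isSome = List.replicate seg.length true := by
  have := List.count_le_length (a := some "O") (l := seg)
  simp only [packB]
  simp [List.map_replicate, ← List.replicate_add]
  omega

theorem segGo_isSome (r : List (Option String)) : ∀ seg,
    (segGo seg r).map Option.isSome = List.replicate seg.length true ++ r.map Option.isSome := by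
  induction r with
  | nil =>
    intro seg
    simp only [segGo]
    rw [packB_isSome]
    simp
  | cons x r ih =>
    intro seg
    simp only [segGo]
    split_ifs with h
    · rw [ih (seg ++ [x])]
      have hx : x.isSome = true := by rcases h with h | h <;> simp [h]
      simp [List.replicate_succ', hx]
    · rw [List.map_append, packB_isSome, List.map_cons, ih []]
      simp

theorem settle_isSome (c : List (Option String)) :
    (settleB c).map Option.isSome = c.map Option.isSome := by
  simpa using segGo_isSome c []

-- ---- grid extensionality ----
theorem grid_ext (p q : List (List String)) (hl : p.length = q.length)
    (hc : ∀ j, colOf p j = colOf q j) : p = q := by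
  apply List.ext_getElem?
  intro i
  by_cases hi : i < p.length
  · have hq : i < q.length := by omega
    rw [List.getElem?_eq_getElem hi, List.getElem?_eq_getElem hq]
    have hrow : p[i] = q[i] := by
      apply List.ext_getElem?
      intro j
      have := congrArg (fun l => l[i]?) (hc j)
      simp only [colOf, List.getElem?_map, List.getElem?_eq_getElem hi,
        List.getElem?_eq_getElem hq, Option.map_some] at this
      exact Option.some.inj this
    rw [hrow]
  · rw [List.getElem?_eq_none (by omega), List.getElem?_eq_none (by omega)]

-- ---- tilt_n_alt characterisation ----
theorem alt_len (p : List (List String)) :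
    (tilt_n_alt p).map List.length = p.map List.length := by
  simp only [tilt_n_alt, List.map_map]
  have h : (List.length ∘ fun ri : List String × Nat =>
      (List.range ri.1.length).map (fun j =>
        (((((List.range ((p.map List.length).foldr max 0)).map
            (fun j' => settleB (colOf p j'))).getD j []).getD ri.2 none).getD ""))) =
      List.length ∘ (Prod.fst (β := Nat)) := by
    funext ri
    simp
  rw [h, ← List.map_map, List.zipIdx_map_fst]

theorem alt_length (p : List (List String)) : (tilt_n_alt p).length = p.length := by
  have := congrArg List.length (alt_len p)
  simpa using this

theorem foldr_max_mem (l : List Nat) (x : Nat) (hx : x ∈ l) : x ≤ l.foldr max 0 := by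
  induction l with
  | nil => cases hx
  | cons a t ih =>
    rcases List.mem_cons.mp hx with rfl | hx
    · exact le_max_left _ _
    · exact le_trans (ih hx) (le_max_right _ _)

theorem settle_some (cs : List (Option String)) (i : Nat) :
    ((settleB cs)[i]?).map Option.isSome = (cs[i]?).map Option.isSome := by
  have := congrArg (fun l => l[i]?) (settle_isSome cs)
  simpa [List.getElem?_map] using this

theorem alt_col (p : List (List String)) (j : Nat) :
    colOf (tilt_n_alt p) j = settleB (colOf p j) := by
  apply List.ext_getElem?
  intro i
  by_cases hi : i < p.length
  · -- row i exists
    have hrow : p[i]? = some p[i] := List.getElem?_eq_getElem hi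
    have hQ : (tilt_n_alt p)[i]? = some ((List.range p[i].length).map (fun jj =>
        (((((List.range ((p.map List.length).foldr max 0)).map
            (fun j' => settleB (colOf p j'))).getD jj []).getD i none).getD ""))) := by
      simp only [tilt_n_alt]
      rw [List.getElem?_map, List.getElem?_zipIdx, hrow]
      simp
    have hsl : i < (settleB (colOf p j)).length := by
      rw [settle_len]
      simp [colOf]
      omega
    have hLHS : (colOf (tilt_n_alt p) j)[i]? = some (((List.range p[i].length).map (fun jj =>
        (((((List.range ((p.map List.length).foldr max 0)).map
            (fun j' => settleB (colOf p j'))).getD jj []).getD i none).getD "")))[j]?) := by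
      simp only [colOf, List.getElem?_map, hQ, Option.map_some]
    rw [hLHS, List.getElem?_eq_getElem hsl]
    have hiso : ((settleB (colOf p j))[i]).isSome = (p[i][j]?).isSome := by
      have h := settle_some (colOf p j) i
      rw [List.getElem?_eq_getElem hsl] at h
      have hcol : (colOf p j)[i]? = some (p[i][j]?) := by
        simp only [colOf, List.getElem?_map, hrow, Option.map_some]
      rw [hcol] at h
      simpa using h
    by_cases hj : j < p[i].length
    · -- in-range cell: a `some` cell of the settled column
      have hjW : j < (p.map List.length).foldr max 0 := by
        have hmem : p[i].length ∈ p.map List.length := by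
          exact List.mem_map.mpr ⟨p[i], List.getElem_mem hi, rfl⟩
        have := foldr_max_mem _ _ hmem
        omega
      have hNC : ((List.range ((p.map List.length).foldr max 0)).map
          (fun j' => settleB (colOf p j'))).getD j [] = settleB (colOf p j) := by
        rw [List.getD_eq_getElem?_getD, List.getElem?_map, List.getElem?_range hjW]
        rfl
      have hpj : p[i][j]? = some p[i][j] := List.getElem?_eq_getElem hj
      have hsome : ((settleB (colOf p j))[i]).isSome := by
        rw [hiso, hpj]
        rfl
      obtain ⟨sv, hsv⟩ := Option.isSome_iff_exists.mp hsome
      rw [List.getElem?_map, List.getElem?_range hj]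
      simp only [Option.map_some, hNC]
      rw [List.getD_eq_getElem?_getD, List.getElem?_eq_getElem hsl, hsv]
      rfl
    · -- j beyond this row: both sides are the `none` (column-absent) cell
      have hno : ((settleB (colOf p j))[i]).isSome = false := by
        rw [hiso, List.getElem?_eq_none (by omega)]
        rfl
      have : (settleB (colOf p j))[i] = none := by
        cases hx : (settleB (colOf p j))[i] with
        | none => rfl
        | some v => rw [hx] at hno; simp at hno
      rw [this, List.getElem?_eq_none]
      simp
      omega
  · -- beyond the grid: both sides run out
    have h1 : (colOf (tilt_n_alt p) j)[i]? = none := by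
      apply List.getElem?_eq_none
      simp [colOf, alt_length]
      omega
    have h2 : (settleB (colOf p j))[i]? = none := by
      apply List.getElem?_eq_none
      rw [settle_len]
      simp [colOf]
      omega
    rw [h1, h2]

-- ---- main induction ----
theorem tiltLoop_eq (f : Nat) (p : List (List String)) (hf : potFrom 0 p < f) :
    tiltLoop f p = tilt_n_alt p := by
  induction f generalizing p with
  | zero => omega
  | succ f ih =>
    simp only [tiltLoop]
    split_ifs with hm
    · -- no moves: p is a fixpoint, hence already settled
      have hs := sweep_zero p hm
      have hlen : (tilt_n_alt p).length = p.length := by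
        have := congrArg List.length (alt_len p)
        simpa using this
      apply grid_ext p (tilt_n_alt p) hlen.symm
      intro j
      rw [alt_col]
      have hfix : sweepColP (colOf p j) = colOf p j := by
        rw [← sweep_col, hs]
      rw [settle_fix _ hfix]
    · have hp := sweep_pot p
      have hlt : potFrom 0 (sweep p).1 < f := by omega
      rw [ih _ hlt]
      -- tilt_n_alt is invariant under one sweep
      have hlen : (tilt_n_alt (sweep p).1).length = (tilt_n_alt p).length := by
        have h1 := congrArg List.length (alt_len (sweep p).1)
        have h2 := congrArg List.length (alt_len p)
        have h3 := congrArg List.length (sweep_len p)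
        simp only [List.length_map] at h1 h2 h3
        omega
      apply grid_ext _ _ hlen
      intro j
      rw [alt_col, alt_col, sweep_col, settle_sweepColP]

theorem tilt_eq (p : List (List String)) : tilt_n p = tilt_n_alt p := by
  unfold tilt_n
  exact tiltLoop_eq _ p (Nat.lt_succ_self _)

-- ===== VERDICT (by name: the statement is the Claim_ definition above) =====
theorem tilt_n_spec : Claim_equal_tilt_n := by
  intro p _ _
  exact tilt_eq p
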